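-- pv_equiv track=rewrite | github.com/hyesoo0411/DUSK | metrics/rouge_eval.py | word_level_lcs
-- ===== SOURCE A (Python) =====
-- def word_level_lcs(seq1: str, seq2: str) -> float:
--     """Word-level LCS"""
--     words1 = seq1.split()
--     words2 = seq2.split()
--     m, n = len(words1), len(words2)
--
--     dp = [[0] * (n + 1) for _ in range(m + 1)]
--
--     for i in range(1, m + 1):
--         for j in range(1, n + 1):
--             if words1[i - 1] == words2[j - 1]:
--                 dp[i][j] = dp[i - 1][j - 1] + 1
--             else:
--                 dp[i][j] = max(dp[i - 1][j], dp[i][j - 1])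
--
--     lcs_length = dp[m][n]
--     max_length = max(m, n) if max(m, n) > 0 else 1
--
--     return lcs_length
-- ===== SOURCE B (Python) =====
-- def word_level_lcs(seq1: str, seq2: str) -> float:
--     """Word-level LCS, computed by top-down memoized recursion over prefix lengths."""
--     words1 = seq1.split()
--     words2 = seq2.split()
--     memo = {}
--
--     def lcs(i, j):
--         if i == 0 or j == 0:
--             return 0
--         if (i, j) in memo:
--             return memo[(i, j)]
--         if words1[i - 1] == words2[j - 1]:
--             r = lcs(i - 1, j - 1) + 1
--         else:
--             r = max(lcs(i - 1, j), lcs(i, j - 1))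
--         memo[(i, j)] = r
--         return r
--
--     return lcs(len(words1), len(words2))
-- ===== Notes on version B (the rewrite author's own statement) =====
-- stated objective: alternative
-- what changed: Replaced the bottom-up explicitly filled (m+1)x(n+1) DP table and its double index loop by a top-down memoized recursion lcs(i, j) over prefix lengths backed by a dict cache, returning lcs(m, n).
import Mathlib
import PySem

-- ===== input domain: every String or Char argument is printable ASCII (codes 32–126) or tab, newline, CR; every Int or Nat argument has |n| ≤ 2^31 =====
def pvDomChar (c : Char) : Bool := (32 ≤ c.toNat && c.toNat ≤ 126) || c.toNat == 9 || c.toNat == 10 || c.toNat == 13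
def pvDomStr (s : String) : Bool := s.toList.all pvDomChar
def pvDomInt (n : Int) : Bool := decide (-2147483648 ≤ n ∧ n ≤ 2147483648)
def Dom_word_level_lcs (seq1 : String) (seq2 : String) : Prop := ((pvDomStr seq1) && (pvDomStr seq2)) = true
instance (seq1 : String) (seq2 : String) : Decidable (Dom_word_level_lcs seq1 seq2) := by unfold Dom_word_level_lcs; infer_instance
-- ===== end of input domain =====

-- B replaces A's explicitly filled (m+1)x(n+1) DP table by a top-down memoized recursion
-- over prefix lengths (dict cache); same return value, different decomposition (objective: alternative).


-- ===== PORT A =====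
-- dp[i][j] read/write (all indices are in range whenever A's Python touches them, so getD/set is exact)
def pvGet2 (dp : List (List Int)) (i j : Nat) : Int := (dp.getD i []).getD j 0
def pvSet2 (dp : List (List Int)) (i j : Nat) (v : Int) : List (List Int) :=
  dp.set i ((dp.getD i []).set j v)

def word_level_lcs (seq1 : String) (seq2 : String) : Int :=
  let words1 := PySem.Str.split₀ seq1
  let words2 := PySem.Str.split₀ seq2
  let m := words1.length
  let n := words2.length
  let dp0 : List (List Int) := List.replicate (m+1) (List.replicate (n+1) (0:Int))
  -- for i in range(1, m+1): for j in range(1, n+1):  (loop variable written as i'+1 = i, j'+1 = j)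
  let dp := (List.range m).foldl (fun dp i' =>
      (List.range n).foldl (fun dp j' =>
        if words1.getD i' "" = words2.getD j' "" then
          pvSet2 dp (i'+1) (j'+1) (pvGet2 dp i' j' + 1)
        else
          pvSet2 dp (i'+1) (j'+1) (max (pvGet2 dp i' (j'+1)) (pvGet2 dp (i'+1) j'))) dp) dp0
  pvGet2 dp m n

-- ===== PORT B =====
-- memoized recursion lcs(i, j) with cache `memo`, threaded as state (Source B's closure dict)
def pvAltLcs (w1 w2 : List String) (i j : Nat) (memo : PySem.Dict (Nat × Nat) Int) :
    Int × PySem.Dict (Nat × Nat) Int :=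
  if _h : i = 0 ∨ j = 0 then (0, memo)
  else
    match memo.get? (i, j) with
    | some v => (v, memo)
    | none =>
      if w1.getD (i-1) "" = w2.getD (j-1) "" then
        let p := pvAltLcs w1 w2 (i-1) (j-1) memo
        let r := p.1 + 1
        (r, p.2.insert (i, j) r)
      else
        let p := pvAltLcs w1 w2 (i-1) j memo
        let q := pvAltLcs w1 w2 i (j-1) p.2
        let r := max p.1 q.1
        (r, q.2.insert (i, j) r)
termination_by i + j
decreasing_by all_goals omega

def word_level_lcs_alt (seq1 : String) (seq2 : String) : Int :=
  let words1 := PySem.Str.split₀ seq1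
  let words2 := PySem.Str.split₀ seq2
  (pvAltLcs words1 words2 words1.length words2.length PySem.Dict.empty).1

-- ===== PRECONDITION & SPEC =====
def Spec_word_level_lcs (seq1 : String) (seq2 : String) (out : Int) : Prop := out = word_level_lcs_alt seq1 seq2
instance (seq1 : String) (seq2 : String) (out : Int) : Decidable (Spec_word_level_lcs seq1 seq2 out) := by unfold Spec_word_level_lcs; infer_instance

-- ===== CLAIM (what is proved, stated in full; the proofs are below) =====
def Claim_equal_word_level_lcs : Prop := ∀ (seq1 : String) (seq2 : String), Dom_word_level_lcs seq1 seq2 → Spec_word_level_lcs seq1 seq2 (word_level_lcs seq1 seq2)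

-- ===== LEMMAS AND PROOFS =====

-- the mathematical LCS-of-prefixes recurrence both ports compute
def pvL (w1 w2 : List String) (i j : Nat) : Int :=
  if i = 0 ∨ j = 0 then 0
  else if w1.getD (i-1) "" = w2.getD (j-1) "" then pvL w1 w2 (i-1) (j-1) + 1
       else max (pvL w1 w2 (i-1) j) (pvL w1 w2 i (j-1))
termination_by i + j
decreasing_by all_goals omega


def GoodMemo (w1 w2 : List String) (memo : PySem.Dict (Nat × Nat) Int) : Prop :=
  ∀ i j v, memo.get? (i, j) = some v → v = pvL w1 w2 i j

theorem goodMemo_insert (w1 w2 : List String) (memo : PySem.Dict (Nat × Nat) Int)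
    (hg : GoodMemo w1 w2 memo) (i j : Nat) (r : Int) (hr : r = pvL w1 w2 i j) :
    GoodMemo w1 w2 (memo.insert (i, j) r) := by
  intro i' j' v hv
  rw [PySem.Dict.get?_insert] at hv
  split at hv
  · rename_i heq
    obtain ⟨h1, h2⟩ := Prod.mk.injEq .. ▸ heq
    cases hv
    simp_all
  · exact hg i' j' v hv

theorem pvL_zero (w1 w2 : List String) (i j : Nat) (h0 : i = 0 ∨ j = 0) :
    pvL w1 w2 i j = 0 := by rw [pvL]; simp [h0]

theorem pvL_step (w1 w2 : List String) (i j : Nat) (h0 : ¬ (i = 0 ∨ j = 0)) :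
    pvL w1 w2 i j =
      if w1.getD (i-1) "" = w2.getD (j-1) "" then pvL w1 w2 (i-1) (j-1) + 1
      else max (pvL w1 w2 (i-1) j) (pvL w1 w2 i (j-1)) := by
  rw [pvL]; simp only [if_neg h0]

theorem alt_correct (w1 w2 : List String) :
    ∀ N i j memo, i + j ≤ N → GoodMemo w1 w2 memo →
      (pvAltLcs w1 w2 i j memo).1 = pvL w1 w2 i j ∧ GoodMemo w1 w2 (pvAltLcs w1 w2 i j memo).2 := by
  intro N
  induction N with
  | zero =>
    intro i j memo hle hg
    have hi : i = 0 := by omega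
    rw [pvAltLcs, pvL_zero w1 w2 i j (Or.inl hi)]
    simp [hi]
    exact hg
  | succ N ih =>
    intro i j memo hle hg
    rw [pvAltLcs]
    by_cases h0 : i = 0 ∨ j = 0
    · rw [pvL_zero w1 w2 i j h0]; simp [h0]; exact hg
    · simp only [dif_neg h0]
      cases hm : memo.get? (i, j) with
      | some v =>
        refine ⟨?_, hg⟩
        show v = pvL w1 w2 i j
        exact hg i j v hm
      | none =>
        by_cases hc : w1.getD (i-1) "" = w2.getD (j-1) ""
        · simp only [if_pos hc]
          have h1 := ih (i-1) (j-1) memo (by omega) hg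
          have hval : pvL w1 w2 (i-1) (j-1) + 1 = pvL w1 w2 i j := by
            rw [pvL_step w1 w2 i j h0, if_pos hc]
          exact ⟨by rw [h1.1, hval], goodMemo_insert _ _ _ h1.2 i j _ (by rw [h1.1, hval])⟩
        · simp only [if_neg hc]
          have h1 := ih (i-1) j memo (by omega) hg
          have h2 := ih i (j-1) (pvAltLcs w1 w2 (i-1) j memo).2 (by omega) h1.2
          have hval : max (pvL w1 w2 (i-1) j) (pvL w1 w2 i (j-1)) = pvL w1 w2 i j := by
            rw [pvL_step w1 w2 i j h0, if_neg hc]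
          exact ⟨by rw [h1.1, h2.1, hval], goodMemo_insert _ _ _ h2.2 i j _ (by rw [h1.1, h2.1, hval])⟩

theorem alt_eq_pvL (seq1 seq2 : String) :
    word_level_lcs_alt seq1 seq2 =
      pvL (PySem.Str.split₀ seq1) (PySem.Str.split₀ seq2) (PySem.Str.split₀ seq1).length (PySem.Str.split₀ seq2).length := by
  have hg : GoodMemo (PySem.Str.split₀ seq1) (PySem.Str.split₀ seq2) PySem.Dict.empty := by
    intro i j v hv; simp [PySem.Dict.get?_empty] at hv
  exact (alt_correct _ _ _ _ _ _ (le_refl _) hg).1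

-- ===== A-side: the table built by the double loop =====
def pvSpecRow (w1 w2 : List String) (n i : Nat) : List Int :=
  (List.range (n+1)).map (fun j => pvL w1 w2 i j)

def pvZeroRow (n : Nat) : List Int := List.replicate (n+1) 0

def pvRowPart (w1 w2 : List String) (n i t : Nat) : List Int :=
  (List.range (t+1)).map (fun j => pvL w1 w2 i j) ++ List.replicate (n - t) 0

def pvMkDP (w1 w2 : List String) (m n k : Nat) : List (List Int) :=
  (List.range (k+1)).map (fun i => pvSpecRow w1 w2 n i) ++ List.replicate (m - k) (pvZeroRow n)

def pvMkPartial (w1 w2 : List String) (m n i t : Nat) : List (List Int) :=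
  (List.range i).map (fun r => pvSpecRow w1 w2 n r) ++ [pvRowPart w1 w2 n i t]
    ++ List.replicate (m - i) (pvZeroRow n)

theorem rowPart_last (w1 w2 : List String) (n i : Nat) :
    pvRowPart w1 w2 n i n = pvSpecRow w1 w2 n i := by
  simp [pvRowPart, pvSpecRow]

theorem rowPart_zero (w1 w2 : List String) (n i : Nat) :
    pvRowPart w1 w2 n i 0 = pvZeroRow n := by
  simp [pvRowPart, pvZeroRow, pvL_zero w1 w2 i 0 (Or.inr rfl), List.replicate_succ]

theorem specRow_zero (w1 w2 : List String) (n : Nat) :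
    pvSpecRow w1 w2 n 0 = pvZeroRow n := by
  simp only [pvSpecRow, pvZeroRow]
  apply List.ext_getElem (by simp)
  intro k h1 h2
  simp [pvL_zero w1 w2 0 k (Or.inl rfl)]

theorem specRow_getD (w1 w2 : List String) (n i j : Nat) (hj : j ≤ n) :
    (pvSpecRow w1 w2 n i).getD j 0 = pvL w1 w2 i j := by
  simp [pvSpecRow, List.getD_eq_getElem?_getD, Nat.lt_succ_of_le hj]

theorem rowPart_getD (w1 w2 : List String) (n i t j : Nat) (hj : j ≤ t) :
    (pvRowPart w1 w2 n i t).getD j 0 = pvL w1 w2 i j := by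
  have hjlt : j < ((List.range (t+1)).map (fun j => pvL w1 w2 i j)).length := by
    simp; omega
  simp [pvRowPart, List.getD_eq_getElem?_getD, List.getElem?_append_left hjlt,
    Nat.lt_succ_of_le hj]

theorem partial_getD_lt (w1 w2 : List String) (m n i t r : Nat) (hr : r < i) :
    (pvMkPartial w1 w2 m n i t).getD r [] = pvSpecRow w1 w2 n r := by
  have hrlt : r < ((List.range i).map (fun r => pvSpecRow w1 w2 n r)).length := by simp [hr]
  simp [pvMkPartial, List.getD_eq_getElem?_getD, List.append_assoc,
    List.getElem?_append_left hrlt, hr]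

theorem partial_getD_self (w1 w2 : List String) (m n i t : Nat) :
    (pvMkPartial w1 w2 m n i t).getD i [] = pvRowPart w1 w2 n i t := by
  rw [pvMkPartial, List.append_assoc, List.getD_eq_getElem?_getD,
    List.getElem?_append_right (by simp)]
  simp

theorem rowPart_set (w1 w2 : List String) (n i t : Nat) (ht : t < n) :
    (pvRowPart w1 w2 n i t).set (t+1) (pvL w1 w2 i (t+1)) = pvRowPart w1 w2 n i (t+1) := by
  have hlen : ((List.range (t+1)).map (fun j => pvL w1 w2 i j)).length = t + 1 := by simp
  have hrep : List.replicate (n - t) (0:Int) = 0 :: List.replicate (n - (t+1)) 0 := by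
    rw [← List.replicate_succ]; congr 1; omega
  rw [pvRowPart, List.set_append, if_neg (by omega), hlen, Nat.sub_self, hrep]
  simp [pvRowPart, List.range_succ, List.map_append]

theorem partial_set (w1 w2 : List String) (m n i t : Nat) (ht : t < n) :
    pvSet2 (pvMkPartial w1 w2 m n i t) i (t+1) (pvL w1 w2 i (t+1)) = pvMkPartial w1 w2 m n i (t+1) := by
  have hlen : ((List.range i).map (fun r => pvSpecRow w1 w2 n r)).length = i := by simp
  rw [pvSet2, partial_getD_self, rowPart_set w1 w2 n i t ht, pvMkPartial, pvMkPartial,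
    List.append_assoc, List.set_append, if_neg (by omega), hlen, Nat.sub_self]
  simp [List.append_assoc]

theorem inner_step (w1 w2 : List String) (m n i' t : Nat) (ht : t < n)
    (hn : n = w2.length) :
    (if w1.getD i' "" = w2.getD t "" then
        pvSet2 (pvMkPartial w1 w2 m n (i'+1) t) (i'+1) (t+1)
          (pvGet2 (pvMkPartial w1 w2 m n (i'+1) t) i' t + 1)
      else
        pvSet2 (pvMkPartial w1 w2 m n (i'+1) t) (i'+1) (t+1)
          (max (pvGet2 (pvMkPartial w1 w2 m n (i'+1) t) i' (t+1))
               (pvGet2 (pvMkPartial w1 w2 m n (i'+1) t) (i'+1) t)))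
      = pvMkPartial w1 w2 m n (i'+1) (t+1) := by
  have hget_prev : ∀ j, j ≤ n → pvGet2 (pvMkPartial w1 w2 m n (i'+1) t) i' j = pvL w1 w2 i' j := by
    intro j hj
    rw [pvGet2, partial_getD_lt w1 w2 m n (i'+1) t i' (Nat.lt_succ_self i'), specRow_getD w1 w2 n i' j hj]
  have hget_cur : pvGet2 (pvMkPartial w1 w2 m n (i'+1) t) (i'+1) t = pvL w1 w2 (i'+1) t := by
    rw [pvGet2, partial_getD_self, rowPart_getD w1 w2 n (i'+1) t t (le_refl t)]
  have hstep := pvL_step w1 w2 (i'+1) (t+1) (by omega)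
  simp only [Nat.add_sub_cancel] at hstep
  by_cases hc : w1.getD i' "" = w2.getD t ""
  · rw [if_pos hc, hget_prev t (by omega),
      show pvL w1 w2 i' t + 1 = pvL w1 w2 (i'+1) (t+1) by rw [hstep, if_pos hc]]
    exact partial_set w1 w2 m n (i'+1) t ht
  · rw [if_neg hc, hget_prev (t+1) (by omega), hget_cur,
      show max (pvL w1 w2 i' (t+1)) (pvL w1 w2 (i'+1) t) = pvL w1 w2 (i'+1) (t+1) by
        rw [hstep, if_neg hc]]
    exact partial_set w1 w2 m n (i'+1) t ht

theorem inner_fold (w1 w2 : List String) (m n i' : Nat) (hn : n = w2.length) :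
    ∀ t, t ≤ n →
      (List.range t).foldl (fun dp j' =>
        if w1.getD i' "" = w2.getD j' "" then
          pvSet2 dp (i'+1) (j'+1) (pvGet2 dp i' j' + 1)
        else
          pvSet2 dp (i'+1) (j'+1) (max (pvGet2 dp i' (j'+1)) (pvGet2 dp (i'+1) j')))
        (pvMkPartial w1 w2 m n (i'+1) 0)
      = pvMkPartial w1 w2 m n (i'+1) t := by
  intro t
  induction t with
  | zero => intro _; simp
  | succ t ih =>
    intro hle
    rw [List.range_succ, List.foldl_append, ih (by omega)]
    simpa using inner_step w1 w2 m n i' t (by omega) hn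

theorem mkdp_to_partial (w1 w2 : List String) (m n i' : Nat) (hi : i' + 1 ≤ m) :
    pvMkDP w1 w2 m n i' = pvMkPartial w1 w2 m n (i'+1) 0 := by
  rw [pvMkDP, pvMkPartial, rowPart_zero, List.range_succ, List.map_append,
    show (m - i' : Nat) = (m - (i'+1)) + 1 by omega, List.replicate_succ]
  simp

theorem partial_to_mkdp (w1 w2 : List String) (m n i' : Nat) :
    pvMkPartial w1 w2 m n (i'+1) n = pvMkDP w1 w2 m n (i'+1) := by
  rw [pvMkPartial, pvMkDP, rowPart_last, List.range_succ (n := i'+1), List.map_append]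
  simp

theorem outer_fold (w1 w2 : List String) (m n : Nat) (hm : m = w1.length) (hn : n = w2.length) :
    ∀ k, k ≤ m →
      (List.range k).foldl (fun dp i' =>
        (List.range n).foldl (fun dp j' =>
          if w1.getD i' "" = w2.getD j' "" then
            pvSet2 dp (i'+1) (j'+1) (pvGet2 dp i' j' + 1)
          else
            pvSet2 dp (i'+1) (j'+1) (max (pvGet2 dp i' (j'+1)) (pvGet2 dp (i'+1) j'))) dp)
        (List.replicate (m+1) (List.replicate (n+1) (0:Int)))
      = pvMkDP w1 w2 m n k := by
  intro k
  induction k with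
  | zero =>
    intro _
    rw [pvMkDP]
    simp [specRow_zero, pvZeroRow, List.replicate_succ]
  | succ k ih =>
    intro hle
    rw [List.range_succ, List.foldl_append, ih (by omega)]
    simp only [List.foldl_cons, List.foldl_nil]
    rw [mkdp_to_partial w1 w2 m n k hle, inner_fold w1 w2 m n k hn n (le_refl n),
      partial_to_mkdp]

theorem mkdp_final (w1 w2 : List String) (m n : Nat) :
    pvGet2 (pvMkDP w1 w2 m n m) m n = pvL w1 w2 m n := by
  have hm : m < ((List.range (m+1)).map (fun i => pvSpecRow w1 w2 n i)).length := by simp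
  rw [pvGet2, pvMkDP, Nat.sub_self]
  simp only [List.replicate_zero, List.append_nil]
  rw [show ((List.range (m+1)).map (fun i => pvSpecRow w1 w2 n i)).getD m [] = pvSpecRow w1 w2 n m from by
    simp [List.getD_eq_getElem?_getD]]
  exact specRow_getD w1 w2 n m n (le_refl n)

theorem word_level_lcs_spec : Claim_equal_word_level_lcs := by
  intro seq1 seq2 _
  unfold Spec_word_level_lcs
  rw [alt_eq_pvL]
  show pvGet2 _ _ _ = _
  rw [outer_fold (PySem.Str.split₀ seq1) (PySem.Str.split₀ seq2) _ _ rfl rfl _ (le_refl _),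
    mkdp_final]
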